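-- pv_equiv track=rewrite | github.com/BA78/poker-game | app/models/ai.py | _find_consecutive_values
-- ===== SOURCE A (Python) =====
-- from typing import List
--
-- def _find_consecutive_values(values: List[int]) -> List[int]:
--     """연속된 숫자들 찾기"""
--     best_consecutive = []
--     current_consecutive = [values[0]]
--
--     for i in range(1, len(values)):
--         if values[i] - values[i-1] <= 2:  # 2 이하의 차이는 연속으로 간주
--             current_consecutive.append(values[i])
--         else:
--             if len(current_consecutive) > len(best_consecutive):
--                 best_consecutive = current_consecutive[:]
--             current_consecutive = [values[i]]
--
--     if len(current_consecutive) > len(best_consecutive):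
--         best_consecutive = current_consecutive
--
--     return best_consecutive
-- ===== SOURCE B (Python) =====
-- from typing import List
--
-- def _find_consecutive_values(values: List[int]) -> List[int]:
--     """Index-based: find the positions where the gap exceeds 2, then return the
--     one slice of `values` between the pair of adjacent cut positions that is
--     furthest apart (max with key keeps the first on ties)."""
--     n = len(values)
--     cuts = [0] + [i for i in range(1, n) if values[i] - values[i - 1] > 2] + [n]
--     start, end = max(zip(cuts, cuts[1:]), key=lambda p: p[1] - p[0])
--     return values[start:end]
-- ===== Notes on version B (the rewrite author's own statement) =====
-- stated objective: alternative
-- what changed: B never builds runs at all: it computes the index positions where the gap exceeds 2, pairs adjacent cut positions with zip, picks the widest pair with max(key=width), and returns a single slice of the input, instead of A's element-by-element accumulation of current/best run lists.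
import Mathlib
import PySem

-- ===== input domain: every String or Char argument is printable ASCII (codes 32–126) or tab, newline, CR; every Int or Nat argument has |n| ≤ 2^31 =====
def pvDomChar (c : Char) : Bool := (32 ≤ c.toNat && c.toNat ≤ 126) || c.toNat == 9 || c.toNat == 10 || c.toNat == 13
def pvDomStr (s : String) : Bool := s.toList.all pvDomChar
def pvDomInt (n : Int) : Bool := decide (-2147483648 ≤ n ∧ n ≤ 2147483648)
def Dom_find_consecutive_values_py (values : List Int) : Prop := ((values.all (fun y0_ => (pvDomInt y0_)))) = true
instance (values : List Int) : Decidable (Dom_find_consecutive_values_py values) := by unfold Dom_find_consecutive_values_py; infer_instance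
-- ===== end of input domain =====

-- B replaces A's element-by-element run accumulation by an index computation: the cut
-- positions where the gap exceeds 2, the widest adjacent pair, and one final slice.
-- Objective: alternative algorithm, same O(n) cost.

-- ===== PORT A =====
-- A's for-loop over indices 1..n-1, carried as recursion on the tail with `prev` = values[i-1],
-- state (best_consecutive, current_consecutive).
def loopA (prev : Int) (rest : List Int) (best cur : List Int) : List Int :=
  match rest with
  | [] => if cur.length > best.length then cur else best
  | x :: rest' =>
    if x - prev ≤ 2 then loopA x rest' best (cur ++ [x])
    else loopA x rest' (if cur.length > best.length then cur else best) [x]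

def find_consecutive_values_py (values : List Int) : List Int :=
  match values with
  | [] => []            -- Python raises IndexError on values[0]; excluded by Pre_
  | v :: rest => loopA v rest [] [v]

-- ===== PORT B =====
def find_consecutive_values_py_alt (values : List Int) : List Int :=
  let n : Int := (values.length : Int)
  -- [i for i in range(1, n) if values[i] - values[i-1] > 2]; every i from range(1, n)
  -- is an in-range index, so pyGetD with default 0 is exact here
  let cuts : List Int := [0] ++ ((PySem.List.pyRange 1 n 1).filter
      (fun i => decide (2 < PySem.List.pyGetD values i 0 - PySem.List.pyGetD values (i - 1) 0))) ++ [n]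
  -- start, end = max(zip(cuts, cuts[1:]), key=lambda p: p[1] - p[0]); zip is never
  -- empty (cuts has ≥ 2 elements), so the none branch is unreachable
  match PySem.List.max? (cuts.zip cuts.tail) (fun p => p.2 - p.1) with
  | some (s, e) => PySem.List.slice values (some s) (some e)
  | none => []
-- values[start:end]

-- ===== PRECONDITION & SPEC =====
-- A raises IndexError on the empty list (values[0]); excluded.
def Pre_find_consecutive_values_py (values : List Int) : Prop := values ≠ []
instance (values : List Int) : Decidable (Pre_find_consecutive_values_py values) := by unfold Pre_find_consecutive_values_py; infer_instance
def pvWitness_find_consecutive_values_py : List Int := [1, 2, 5, 6, 7]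

def Spec_find_consecutive_values_py (values : List Int) (out : List Int) : Prop := out = find_consecutive_values_py_alt values
instance (values : List Int) (out : List Int) : Decidable (Spec_find_consecutive_values_py values out) := by unfold Spec_find_consecutive_values_py; infer_instance

-- ===== CLAIM (what is proved, stated in full; the proofs are below) =====
def Claim_equal_find_consecutive_values_py : Prop := ∀ (values : List Int), Dom_find_consecutive_values_py values → Pre_find_consecutive_values_py values → Spec_find_consecutive_values_py values (find_consecutive_values_py values)

-- ===== LEMMAS AND PROOFS =====

-- Proof-layer bridge: the list of maximal runs, built left to right (mirrors neither port;
-- both are related to it).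
def updateLast (segs : List (List Int)) (x : Int) : List (List Int) :=
  match segs with
  | [] => []
  | [s] => [s ++ [x]]
  | s :: rest => s :: updateLast rest x

def loopB (prev : Int) (rest : List Int) (segs : List (List Int)) : List (List Int) :=
  match rest with
  | [] => segs
  | x :: rest' =>
    if x - prev ≤ 2 then loopB x rest' (updateLast segs x)
    else loopB x rest' (segs ++ [[x]])

def consHead (x : Int) : List (List Int) → List (List Int)
  | [] => [[x]]
  | s :: r => (x :: s) :: r

-- The cut positions / adjacent pairs of B, as proof-layer abbreviations.
def gapIdx (vs : List Int) : List Int :=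
  (PySem.List.pyRange 1 (vs.length : Int) 1).filter
    (fun i => decide (2 < PySem.List.pyGetD vs i 0 - PySem.List.pyGetD vs (i - 1) 0))

def cutsOf (vs : List Int) : List Int := 0 :: (gapIdx vs ++ [(vs.length : Int)])

def pairsOf (vs : List Int) : List (Int × Int) := (cutsOf vs).zip (cutsOf vs).tail

theorem updateLast_cons (s : List Int) (T : List (List Int)) (x : Int) (h : T ≠ []) :
    updateLast (s :: T) x = s :: updateLast T x := by
  cases T with
  | nil => exact absurd rfl h
  | cons a b => rfl

theorem loopB_ne_nil (prev : Int) (rest : List Int) (segs : List (List Int)) (h : segs ≠ []) :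
    loopB prev rest segs ≠ [] := by
  induction rest generalizing prev segs with
  | nil => simpa [loopB] using h
  | cons x rest' ih =>
    simp only [loopB]
    split
    · apply ih
      cases segs with
      | nil => exact absurd rfl h
      | cons a b => cases b <;> simp [updateLast]
    · apply ih; simp

theorem loopB_shift (prev : Int) (rest : List Int) (s : List Int) (T : List (List Int)) (h : T ≠ []) :
    loopB prev rest (s :: T) = s :: loopB prev rest T := by
  induction rest generalizing prev T with
  | nil => simp [loopB]
  | cons x rest' ih =>
    simp only [loopB]
    split
    · rw [updateLast_cons s T x h]
      apply ih
      cases T with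
      | nil => exact absurd rfl h
      | cons a b => cases b <;> simp [updateLast]
    · rw [show (s :: T) ++ [[x]] = s :: (T ++ [[x]]) from rfl]
      apply ih; simp

-- A's loop equals folding the best-so-far step over the run list.
theorem loopA_eq_fold (rest : List Int) (prev : Int) (b cur : List Int) :
    loopA prev rest b cur
      = (loopB prev rest [cur]).foldl (fun b t => if t.length > b.length then t else b) b := by
  induction rest generalizing prev b cur with
  | nil => simp [loopA, loopB]
  | cons x rest' ih =>
    simp only [loopA, loopB]
    split
    · rw [ih]; rfl
    · rw [show ([cur] : List (List Int)) ++ [[x]] = cur :: [[x]] from rfl,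
          loopB_shift x rest' cur [[x]] (by simp)]
      rw [ih]
      rfl

theorem loopB_nonempty_segs (rs : List Int) (p : Int) (segs : List (List Int))
    (hs : ∀ s ∈ segs, s ≠ []) : ∀ s ∈ loopB p rs segs, s ≠ [] := by
  induction rs generalizing p segs with
  | nil => simpa [loopB] using hs
  | cons x rs' ih =>
    simp only [loopB]
    split
    · apply ih
      intro s hsmem
      induction segs with
      | nil => simp [updateLast] at hsmem
      | cons a b ihb =>
        cases b with
        | nil =>
          simp only [updateLast, List.mem_singleton] at hsmem
          subst hsmem; simp
        | cons c d =>
          rw [updateLast_cons a (c :: d) x (by simp)] at hsmem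
          rcases List.mem_cons.mp hsmem with h1 | h2
          · exact h1 ▸ hs a (by simp)
          · exact ihb (fun s hm => hs s (List.mem_cons_of_mem a hm)) h2
    · apply ih
      intro s hsmem
      rcases List.mem_append.mp hsmem with h1 | h2
      · exact hs s h1
      · simp only [List.mem_singleton] at h2; subst h2; simp

theorem updateLast_consHead (x y : Int) (segs : List (List Int)) (h : segs ≠ []) :
    updateLast (consHead x segs) y = consHead x (updateLast segs y) := by
  cases segs with
  | nil => exact absurd rfl h
  | cons s r =>
    cases r with
    | nil => rfl
    | cons a b =>
      rw [show consHead x (s :: a :: b) = (x :: s) :: a :: b from rfl,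
          updateLast_cons (x :: s) (a :: b) y (by simp),
          updateLast_cons s (a :: b) y (by simp)]
      rfl

theorem loopB_consHead (rest : List Int) (p x : Int) (segs : List (List Int)) (h : segs ≠ []) :
    loopB p rest (consHead x segs) = consHead x (loopB p rest segs) := by
  induction rest generalizing p segs with
  | nil => simp [loopB]
  | cons y rest' ih =>
    simp only [loopB]
    split
    · rw [updateLast_consHead x y segs h]
      apply ih
      cases segs with
      | nil => exact absurd rfl h
      | cons a b => cases b <;> simp [updateLast]
    · rw [show consHead x segs ++ [[y]] = consHead x (segs ++ [[y]]) from by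
          cases segs with
          | nil => exact absurd rfl h
          | cons s r => rfl]
      apply ih; simp

-- shift lemmas ---------------------------------------------------------------

theorem pyGetD_cons_shift (x : Int) (xs : List Int) (i : Int) (h : 0 ≤ i) :
    PySem.List.pyGetD (x :: xs) (i + 1) 0 = PySem.List.pyGetD xs i 0 := by
  rw [PySem.List.pyGetD_of_nonneg _ _ (by omega), PySem.List.pyGetD_of_nonneg _ _ h]
  have hi : (i + 1).toNat = i.toNat + 1 := by omega
  simp [hi]

theorem pyRange_one_shift (n : Nat) (h : 1 ≤ n) :
    PySem.List.pyRange 1 ((n : Int) + 1) 1 = 1 :: (PySem.List.pyRange 1 (n : Int) 1).map (· + 1) := by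
  obtain ⟨m, rfl⟩ : ∃ m, n = m + 1 := ⟨n - 1, by omega⟩
  rw [PySem.List.pyRange_one, PySem.List.pyRange_one]
  have h1 : (((m + 1 : Nat) : Int) + 1 - 1).toNat = m + 1 := by omega
  have h2 : (((m + 1 : Nat) : Int) - 1).toNat = m := by omega
  rw [h1, h2, List.range_succ_eq_map]
  simp [List.map_map, Function.comp]
  intro a _
  ring

theorem gapIdx_cons (v y : Int) (t : List Int) :
    gapIdx (v :: y :: t)
      = (if 2 < y - v then [(1 : Int)] else []) ++ (gapIdx (y :: t)).map (· + 1) := by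
  unfold gapIdx
  have hlen : (((v :: y :: t).length : Int)) = ((y :: t).length : Int) + 1 := by
    push_cast [List.length_cons]; ring
  rw [hlen, pyRange_one_shift (y :: t).length (by simp)]
  rw [List.filter_cons, List.filter_map]
  have hhead : PySem.List.pyGetD (v :: y :: t) 1 0 - PySem.List.pyGetD (v :: y :: t) (1 - 1) 0 = y - v := by
    have e1 : PySem.List.pyGetD (v :: y :: t) 1 0 = y := by
      rw [PySem.List.pyGetD_of_nonneg _ _ (by omega)]
      rfl
    have e0 : PySem.List.pyGetD (v :: y :: t) (1 - 1) 0 = v := by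
      rw [show (1 - 1 : Int) = 0 from by ring, PySem.List.pyGetD_of_nonneg _ _ (by omega)]
      rfl
    rw [e1, e0]
  have hfilter : (PySem.List.pyRange 1 ((y :: t).length : Int) 1).filter
        ((fun i => decide (2 < PySem.List.pyGetD (v :: y :: t) i 0 - PySem.List.pyGetD (v :: y :: t) (i - 1) 0)) ∘ (· + 1))
      = (PySem.List.pyRange 1 ((y :: t).length : Int) 1).filter
        (fun i => decide (2 < PySem.List.pyGetD (y :: t) i 0 - PySem.List.pyGetD (y :: t) (i - 1) 0)) := by
    apply List.filter_congr
    intro i hi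
    have h1 : 1 ≤ i := (PySem.List.mem_pyRange_one.mp hi).1
    simp only [Function.comp]
    have e1 : PySem.List.pyGetD (v :: y :: t) (i + 1) 0 = PySem.List.pyGetD (y :: t) i 0 :=
      pyGetD_cons_shift v (y :: t) i (by omega)
    have e2 : PySem.List.pyGetD (v :: y :: t) (i + 1 - 1) 0 = PySem.List.pyGetD (y :: t) (i - 1) 0 := by
      have : i + 1 - 1 = (i - 1) + 1 := by ring
      rw [this, pyGetD_cons_shift v (y :: t) (i - 1) (by omega)]
    rw [e1, e2]
  rw [hfilter, hhead]
  by_cases hgap : 2 < y - v <;> simp [hgap]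

theorem mem_gapIdx (vs : List Int) (i : Int) (h : i ∈ gapIdx vs) :
    1 ≤ i ∧ i < (vs.length : Int) := by
  unfold gapIdx at h
  exact PySem.List.mem_pyRange_one.mp (List.mem_filter.mp h).1

theorem cutsOf_pairwise (vs : List Int) (h : vs ≠ []) : (cutsOf vs).Pairwise (· < ·) := by
  unfold cutsOf
  have hlen : (1 : Int) ≤ (vs.length : Int) := by
    cases vs with
    | nil => exact absurd rfl h
    | cons a b => push_cast [List.length_cons]; omega
  have hg : (gapIdx vs).Pairwise (· < ·) := by
    unfold gapIdx
    exact (PySem.List.pairwise_lt_pyRange_one 1 (vs.length : Int)).filter _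
  refine List.pairwise_cons.mpr ⟨?_, ?_⟩
  · intro b hb
    rcases List.mem_append.mp hb with h1 | h2
    · have := mem_gapIdx vs b h1; omega
    · simp only [List.mem_singleton] at h2; omega
  · refine List.pairwise_append.mpr ⟨hg, by simp, ?_⟩
    intro a ha b hb
    simp only [List.mem_singleton] at hb
    have := mem_gapIdx vs a ha; omega

theorem zip_tail_lt {l : List Int} (h : l.Pairwise (· < ·)) :
    ∀ p ∈ l.zip l.tail, p.1 < p.2 := by
  induction l with
  | nil => simp
  | cons a rest ih =>
    intro p hp
    cases rest with
    | nil => simp at hp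
    | cons b r =>
      rcases List.mem_cons.mp hp with h1 | h2
      · subst h1
        exact (List.pairwise_cons.mp h).1 b (by simp)
      · exact ih (List.pairwise_cons.mp h).2 p h2

theorem mem_cutsOf_bounds (vs : List Int) (c : Int) (h : c ∈ cutsOf vs) :
    0 ≤ c ∧ c ≤ (vs.length : Int) := by
  unfold cutsOf at h
  rcases List.mem_cons.mp h with h1 | h2
  · subst h1; constructor <;> simp
  · rcases List.mem_append.mp h2 with h3 | h4
    · have := mem_gapIdx vs c h3; omega
    · simp only [List.mem_singleton] at h4; omega

theorem mem_pairsOf_bounds (vs : List Int) (h : vs ≠ []) :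
    ∀ p ∈ pairsOf vs, 0 ≤ p.1 ∧ p.1 < p.2 ∧ p.2 ≤ (vs.length : Int) := by
  intro p hp
  have hmem := List.of_mem_zip hp
  have h1 := mem_cutsOf_bounds vs p.1 hmem.1
  have h2 := mem_cutsOf_bounds vs p.2 (List.mem_of_mem_tail hmem.2)
  have h3 := zip_tail_lt (cutsOf_pairwise vs h) p hp
  exact ⟨h1.1, h3, h2.2⟩

theorem slice_cons_shift (x : Int) (xs : List Int) (a b : Int) (ha : 0 ≤ a) (hb : 0 ≤ b) :
    PySem.List.slice (x :: xs) (some (a + 1)) (some (b + 1)) = PySem.List.slice xs (some a) (some b) := by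
  rw [PySem.List.slice_toNat _ (by omega) (by omega), PySem.List.slice_toNat _ ha hb]
  have h1 : (a + 1).toNat = a.toNat + 1 := by omega
  have h2 : (b + 1).toNat = b.toNat + 1 := by omega
  rw [h1, h2]
  simp [Nat.succ_sub_succ]

theorem slice_cons_zero (x : Int) (xs : List Int) (b : Int) (hb : 0 ≤ b) :
    PySem.List.slice (x :: xs) (some 0) (some (b + 1)) = x :: PySem.List.slice xs (some 0) (some b) := by
  rw [PySem.List.slice_toNat _ (by omega) (by omega), PySem.List.slice_toNat _ (by omega) hb]
  have h1 : (b + 1).toNat = b.toNat + 1 := by omega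
  simp [h1]

-- the central correspondence: B's pairs, sliced, are exactly the run list
theorem segs_eq (rest : List Int) : ∀ v : Int,
    (pairsOf (v :: rest)).map (fun p => PySem.List.slice (v :: rest) (some p.1) (some p.2))
      = loopB v rest [[v]] := by
  induction rest with
  | nil =>
    intro v
    have hg : gapIdx [v] = [] := by
      unfold gapIdx
      rw [show (([v] : List Int).length : Int) = 1 from by simp, PySem.List.pyRange_one_eq_nil (by omega)]
      rfl
    have hpairs1 : pairsOf [v] = [(0, 1)] := by
      unfold pairsOf cutsOf
      rw [hg]
      rfl
    rw [hpairs1]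
    simp only [List.map_cons, List.map_nil]
    rw [PySem.List.slice_toNat _ (by omega) (by omega)]
    rfl
  | cons y t ih =>
    intro v
    have hlen : (((v :: y :: t).length : Int)) = (((y :: t).length : Int)) + 1 := by
      push_cast [List.length_cons]; ring
    have hcuts : cutsOf (v :: y :: t)
        = 0 :: ((if 2 < y - v then [(1 : Int)] else [])
            ++ (gapIdx (y :: t) ++ [((y :: t).length : Int)]).map (· + 1)) := by
      unfold cutsOf
      rw [gapIdx_cons v y t, hlen]
      simp [List.append_assoc]
    obtain ⟨c, L₂, hL⟩ := List.exists_cons_of_ne_nil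
      (show gapIdx (y :: t) ++ [((y :: t).length : Int)] ≠ [] by simp)
    have hc0 : 0 ≤ c :=
      (mem_cutsOf_bounds (y :: t) c (by unfold cutsOf; rw [hL]; simp)).1
    have hbounds : ∀ p ∈ (c :: L₂).zip L₂, 0 ≤ p.1 ∧ 0 ≤ p.2 := by
      intro p hp
      have hmem := List.of_mem_zip hp
      have h1 : p.1 ∈ cutsOf (y :: t) := by
        unfold cutsOf; rw [hL]; exact List.mem_cons_of_mem _ hmem.1
      have h2 : p.2 ∈ cutsOf (y :: t) := by
        unfold cutsOf; rw [hL]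
        exact List.mem_cons_of_mem _ (List.mem_cons_of_mem _ hmem.2)
      exact ⟨(mem_cutsOf_bounds _ p.1 h1).1, (mem_cutsOf_bounds _ p.2 h2).1⟩
    have hpairsY : pairsOf (y :: t) = (0, c) :: (c :: L₂).zip L₂ := by
      unfold pairsOf cutsOf
      rw [hL]
      rfl
    -- the shifted tail pairs, sliced in (v :: y :: t), are the unshifted pairs sliced in (y :: t)
    have htail : ((((c + 1) :: L₂.map (· + 1)).zip (L₂.map (· + 1))).map
          (fun p => PySem.List.slice (v :: y :: t) (some p.1) (some p.2)))
        = ((c :: L₂).zip L₂).map (fun p => PySem.List.slice (y :: t) (some p.1) (some p.2)) := by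
      rw [show ((c + 1) :: L₂.map (· + 1)) = (c :: L₂).map (· + 1) from rfl, List.zip_map,
          List.map_map]
      apply List.map_congr_left
      intro p hp
      have hb := hbounds p hp
      simp only [Function.comp, Prod.map]
      exact slice_cons_shift v (y :: t) p.1 p.2 hb.1 hb.2
    by_cases hgap : 2 < y - v
    · -- a gap right after v: the first run is [v]
      have hpairs : pairsOf (v :: y :: t)
          = (0, 1) :: (1, c + 1) :: ((c + 1) :: L₂.map (· + 1)).zip (L₂.map (· + 1)) := by
        unfold pairsOf
        rw [hcuts, hL, if_pos hgap]
        rfl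
      rw [hpairs]
      simp only [List.map_cons]
      rw [htail]
      have hfirst : PySem.List.slice (v :: y :: t) (some 0) (some 1) = [v] := by
        rw [PySem.List.slice_toNat _ (by omega) (by omega)]
        rfl
      have hsecond : PySem.List.slice (v :: y :: t) (some 1) (some (c + 1))
          = PySem.List.slice (y :: t) (some 0) (some c) := by
        have := slice_cons_shift v (y :: t) 0 c (by omega) hc0
        norm_num at this
        exact this
      rw [hfirst, hsecond]
      have hrhs : loopB v (y :: t) [[v]] = [v] :: loopB y t [[y]] := by
        simp only [loopB, if_neg (by omega : ¬ y - v ≤ 2)]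
        rw [show ([[v]] : List (List Int)) ++ [[y]] = [v] :: [[y]] from rfl]
        exact loopB_shift y t [v] [[y]] (by simp)
      rw [hrhs, ← ih y, hpairsY]
      simp only [List.map_cons]
    · -- no gap: v joins the first run of (y :: t)
      have hpairs : pairsOf (v :: y :: t)
          = (0, c + 1) :: ((c + 1) :: L₂.map (· + 1)).zip (L₂.map (· + 1)) := by
        unfold pairsOf
        rw [hcuts, hL, if_neg hgap]
        rfl
      rw [hpairs]
      simp only [List.map_cons]
      rw [htail]
      rw [slice_cons_zero v (y :: t) c hc0]
      have hrhs : loopB v (y :: t) [[v]] = consHead v (loopB y t [[y]]) := by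
        simp only [loopB, if_pos (by omega : y - v ≤ 2)]
        rw [show updateLast [[v]] y = [[v, y]] from rfl,
            show ([[v, y]] : List (List Int)) = consHead v [[y]] from rfl]
        exact loopB_consHead t y v [[y]] (by simp)
      rw [hrhs, ← ih y, hpairsY]
      simp only [List.map_cons]
      rfl

-- length of an in-bounds slice
theorem length_slice_pair (vs : List Int) (a b : Int) (ha : 0 ≤ a) (hab : a ≤ b)
    (hb : b ≤ (vs.length : Int)) :
    (((PySem.List.slice vs (some a) (some b)).length : Int)) = b - a := by
  rw [PySem.List.slice_toNat _ ha (by omega)]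
  simp only [List.length_take, List.length_drop]
  omega

-- the strict-improvement fold commutes with mapping pairs to their slices
theorem fold_map_slice (l : List (Int × Int)) : ∀ (p₀ : Int × Int)
    (g : Int × Int → List Int),
    (∀ p ∈ p₀ :: l, ((g p).length : Int) = p.2 - p.1) →
    (l.map g).foldl (fun b t => if t.length > b.length then t else b) (g p₀)
      = g (l.foldl (fun m p => if m.2 - m.1 < p.2 - p.1 then p else m) p₀) := by
  induction l with
  | nil => intro p₀ g _; rfl
  | cons q qs ih =>
    intro p₀ g hlen
    simp only [List.map_cons, List.foldl_cons]
    have h0 := hlen p₀ (by simp)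
    have hq := hlen q (by simp)
    have hcond : ((g p₀).length < (g q).length) ↔ (p₀.2 - p₀.1 < q.2 - q.1) := by
      rw [← Int.ofNat_lt]
      omega
    by_cases hc : p₀.2 - p₀.1 < q.2 - q.1
    · rw [if_pos (by simpa [gt_iff_lt, hcond] using hc), if_pos hc]
      exact ih q g (fun p hp => hlen p (by
        rcases List.mem_cons.mp hp with h1 | h2
        · subst h1; simp
        · simp [h2]))
    · rw [if_neg (by simpa [gt_iff_lt, hcond] using hc), if_neg hc]
      exact ih p₀ g (fun p hp => hlen p (by
        rcases List.mem_cons.mp hp with h1 | h2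
        · subst h1; simp
        · simp [h2]))

-- Python max with a key is the first-maximum fold
theorem max?_cons_foldl (t : List (Int × Int)) : ∀ (x : Int × Int) (key : Int × Int → Int),
    PySem.List.max? (x :: t) key
      = some (t.foldl (fun m p => if key m < key p then p else m) x) := by
  induction t with
  | nil => intro x key; rfl
  | cons q qs ih =>
    intro x key
    show PySem.List.max? (x :: q :: qs) key = _
    unfold PySem.List.max?
    simp only [List.foldl_cons]
    by_cases hc : key x < key q
    · rw [if_pos hc]
      have := ih q key
      unfold PySem.List.max? at this
      simpa [List.foldl_cons, hc] using this
    · rw [if_neg hc]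
      have := ih x key
      unfold PySem.List.max? at this
      simpa [List.foldl_cons, hc] using this

-- ===== VERDICT (by name: the statements are the Claim_ definitions above) =====

theorem find_consecutive_values_py_spec : Claim_equal_find_consecutive_values_py := by
  intro values _ hpre
  unfold Spec_find_consecutive_values_py
  cases values with
  | nil => exact absurd rfl hpre
  | cons v rest =>
    simp only [find_consecutive_values_py, find_consecutive_values_py_alt]
    rw [loopA_eq_fold]
    -- identify the port's cuts with cutsOf
    have hcuts_eq : ([(0 : Int)] ++ ((PySem.List.pyRange 1 ((v :: rest).length : Int) 1).filter
          (fun i => decide (2 < PySem.List.pyGetD (v :: rest) i 0 - PySem.List.pyGetD (v :: rest) (i - 1) 0)))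
        ++ [((v :: rest).length : Int)]) = cutsOf (v :: rest) := by
      unfold cutsOf gapIdx
      simp
    rw [hcuts_eq]
    -- the pairs are nonempty
    have hsegs := segs_eq rest v
    have hne : pairsOf (v :: rest) ≠ [] := by
      intro hnil
      have := loopB_ne_nil v rest [[v]] (by simp)
      rw [← hsegs, hnil] at this
      exact this rfl
    obtain ⟨q₀, qt, hq⟩ := List.exists_cons_of_ne_nil hne
    have hpairs_def : (cutsOf (v :: rest)).zip (cutsOf (v :: rest)).tail = q₀ :: qt := by
      rw [← pairsOf]; exact hq
    rw [hpairs_def, max?_cons_foldl]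
    obtain ⟨s, e, hse⟩ : ∃ s e,
        qt.foldl (fun m p => if m.2 - m.1 < p.2 - p.1 then p else m) q₀ = (s, e) := ⟨_, _, rfl⟩
    rw [hse]
    show (loopB v rest [[v]]).foldl (fun b t => if t.length > b.length then t else b) []
        = PySem.List.slice (v :: rest) (some s) (some e)
    rw [hq] at hsegs
    simp only [List.map_cons] at hsegs
    rw [← hsegs, List.foldl_cons]
    have hq0ne : PySem.List.slice (v :: rest) (some q₀.1) (some q₀.2) ≠ [] := by
      apply loopB_nonempty_segs rest v [[v]] (by simp)
      rw [← hsegs]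
      exact List.mem_cons_self
    have hpos : (PySem.List.slice (v :: rest) (some q₀.1) (some q₀.2)).length
        > ([] : List Int).length := by
      simp only [List.length_nil, gt_iff_lt, List.length_pos_iff]
      exact hq0ne
    rw [if_pos hpos]
    have hlen : ∀ p ∈ q₀ :: qt,
        (((fun p => PySem.List.slice (v :: rest) (some p.1) (some p.2)) p).length : Int)
          = p.2 - p.1 := by
      intro p hp
      have hb := mem_pairsOf_bounds (v :: rest) (by simp) p (by rw [hq]; exact hp)
      exact length_slice_pair (v :: rest) p.1 p.2 hb.1 (le_of_lt hb.2.1) hb.2.2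
    have hfm := fold_map_slice qt q₀
      (fun p => PySem.List.slice (v :: rest) (some p.1) (some p.2)) hlen
    rw [hfm, hse]
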